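-- pv_equiv track=rewrite | github.com/kael02/cyber-assistant | tools/contexts/conversation_context.py | _has_similar_field_references
-- ===== SOURCE A (Python) =====
-- from typing import List, Dict, Any
--
-- def _has_similar_field_references(current_input: str, previous_conditions: List[str]) -> bool:
--     """Check if current input references similar fields as previous conditions."""
--     current_lower = current_input.lower()
--
--     field_patterns = {
--         'ip': ['ip', 'address'],
--         'port': ['port'],
--         'user': ['user', 'username'],
--         'process': ['process', 'executable'],
--         'file': ['file', 'path'],
--         'protocol': ['protocol', 'tcp', 'udp']
--     }
--
--     for condition in previous_conditions:
--         for field_type, keywords in field_patterns.items():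
--             if any(keyword in condition.lower() for keyword in keywords):
--                 if any(keyword in current_lower for keyword in keywords):
--                     return True
--
--     return False
-- ===== SOURCE B (Python) =====
-- from typing import List, Dict, Any
--
-- def _has_similar_field_references(current_input: str, previous_conditions: List[str]) -> bool:
--     """Check if current input references similar fields as previous conditions."""
--     current_lower = current_input.lower()
--     # One joined, lowercased corpus replaces the per-condition scan: a keyword
--     # occurs in some condition iff it occurs in the newline-joined corpus
--     # (keywords contain no newline, so no match can span a boundary).
--     corpus = "\n".join(previous_conditions).lower()
--
--     field_patterns = {
--         'ip': ['ip', 'address'],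
--         'port': ['port'],
--         'user': ['user', 'username'],
--         'process': ['process', 'executable'],
--         'file': ['file', 'path'],
--         'protocol': ['protocol', 'tcp', 'udp']
--     }
--
--     for keywords in field_patterns.values():
--         if any(k in current_lower for k in keywords) and any(k in corpus for k in keywords):
--             return True
--     return False
-- ===== Notes on version B (the rewrite author's own statement) =====
-- stated objective: faster
-- what changed: B eliminates the loop over previous_conditions: it lowercases a single newline-joined corpus of all previous conditions once, then for each keyword group tests membership in the current input and in that corpus (correct because no newline-free keyword can span a join boundary), instead of A's nested per-condition, per-group scan that lowercases each condition again inside every inner test.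
import Mathlib
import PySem

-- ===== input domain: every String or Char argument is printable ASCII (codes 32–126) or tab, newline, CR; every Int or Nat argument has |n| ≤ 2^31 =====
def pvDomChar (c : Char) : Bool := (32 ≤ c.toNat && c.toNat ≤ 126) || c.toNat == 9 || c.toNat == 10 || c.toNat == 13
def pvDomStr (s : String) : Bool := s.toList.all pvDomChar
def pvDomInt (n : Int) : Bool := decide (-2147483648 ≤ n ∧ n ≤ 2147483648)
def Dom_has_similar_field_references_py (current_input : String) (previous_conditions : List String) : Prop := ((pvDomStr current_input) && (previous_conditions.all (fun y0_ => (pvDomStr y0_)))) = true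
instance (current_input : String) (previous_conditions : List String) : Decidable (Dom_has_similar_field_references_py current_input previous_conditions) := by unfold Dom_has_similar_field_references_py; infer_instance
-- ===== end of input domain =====

-- B replaces A's per-condition nested scan by one lowercased newline-joined corpus tested per keyword group; alternative decomposition, same results.
-- ===== PORT A =====
-- the field_patterns dict literal (iterated in insertion order)
def pvFieldPatterns : List (String × List String) :=
  [("ip", ["ip", "address"]),
   ("port", ["port"]),
   ("user", ["user", "username"]),
   ("process", ["process", "executable"]),
   ("file", ["file", "path"]),
   ("protocol", ["protocol", "tcp", "udp"])]

def has_similar_field_references_py (current_input : String) (previous_conditions : List String) : Bool :=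
  let current_lower := PySem.Str.lower current_input
  -- for condition in previous_conditions: for field_type, keywords in field_patterns.items(): … return True / return False
  previous_conditions.any (fun condition =>
    pvFieldPatterns.any (fun p =>
      (p.2.any (fun keyword => PySem.Str.isIn keyword (PySem.Str.lower condition))) &&
      (p.2.any (fun keyword => PySem.Str.isIn keyword current_lower))))

-- ===== PORT B =====
-- B iterates field_patterns.values() only
def pvFieldGroups : List (List String) :=
  [["ip", "address"], ["port"], ["user", "username"],
   ["process", "executable"], ["file", "path"], ["protocol", "tcp", "udp"]]

def has_similar_field_references_py_alt (current_input : String) (previous_conditions : List String) : Bool :=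
  let current_lower := PySem.Str.lower current_input
  -- corpus = "\n".join(previous_conditions).lower()
  let corpus := PySem.Str.lower (PySem.Str.join "\n" previous_conditions)
  -- for keywords in field_patterns.values(): if any(… current_lower) and any(… corpus): return True / return False
  pvFieldGroups.any (fun keywords =>
    (keywords.any (fun k => PySem.Str.isIn k current_lower)) &&
    (keywords.any (fun k => PySem.Str.isIn k corpus)))

-- ===== PRECONDITION & SPEC =====
def Spec_has_similar_field_references_py (current_input : String) (previous_conditions : List String) (out : Bool) : Prop := out = has_similar_field_references_py_alt current_input previous_conditions
instance (current_input : String) (previous_conditions : List String) (out : Bool) : Decidable (Spec_has_similar_field_references_py current_input previous_conditions out) := by unfold Spec_has_similar_field_references_py; infer_instance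

-- ===== CLAIM (what is proved, stated in full; the proofs are below) =====
def Claim_equal_has_similar_field_references_py : Prop := ∀ (current_input : String) (previous_conditions : List String), Dom_has_similar_field_references_py current_input previous_conditions → Spec_has_similar_field_references_py current_input previous_conditions (has_similar_field_references_py current_input previous_conditions)

-- ===== LEMMAS AND PROOFS =====

-- a prefix of s ++ c :: t avoiding c is a prefix of s
theorem pv_prefix_append_cons {α : Type} {k s t : List α} {c : α} (hc : c ∉ k)
    (h : k <+: s ++ c :: t) : k <+: s := by
  rcases h with ⟨r, hr⟩
  by_cases hl : k.length ≤ s.length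
  · have h1 : k <+: s ++ c :: t := ⟨r, hr⟩
    have h2 : s <+: s ++ c :: t := ⟨c :: t, rfl⟩
    exact List.prefix_of_prefix_length_le h1 h2 hl
  · exfalso
    rw [not_le] at hl
    have : (k ++ r)[s.length]? = (s ++ c :: t)[s.length]? := by rw [hr]
    rw [List.getElem?_append_left hl, List.getElem?_append_right (le_refl _)] at this
    simp at this
    exact hc (List.mem_of_getElem? this)

-- an infix of s ++ c :: t avoiding c lies in s or in t
theorem pv_infix_append_cons {α : Type} {k : List α} {c : α} (hc : c ∉ k) (s t : List α) :
    k <:+: s ++ c :: t ↔ k <:+: s ∨ k <:+: t := by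
  induction s with
  | nil =>
    simp only [List.nil_append, List.infix_cons_iff]
    constructor
    · rintro (h | h)
      · left
        have := pv_prefix_append_cons (s := []) hc (by simpa using h)
        simp [List.prefix_nil] at this
        simp [this]
      · right; exact h
    · rintro (h | h)
      · rw [List.infix_nil] at h; subst h; right; exact List.nil_infix
      · right; exact h
  | cons a s' ih =>
    rw [List.cons_append, List.infix_cons_iff, ih, List.infix_cons_iff (l₂ := s')]
    constructor
    · rintro (h | h | h)
      · exact Or.inl (Or.inl (pv_prefix_append_cons (s := a :: s') hc h))
      · exact Or.inl (Or.inr h)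
      · exact Or.inr h
    · rintro ((h | h) | h)
      · exact Or.inl (h.trans ⟨c :: t, rfl⟩)
      · exact Or.inr (Or.inl h)
      · exact Or.inr (Or.inr h)

-- a nonempty word avoiding the separator is an infix of the joined corpus iff it is an infix of some part
theorem pv_infix_join {k : List Char} {c : Char} (hc : c ∉ k) (hk : k ≠ []) (ls : List (List Char)) :
    k <:+: PySem.Chars.join [c] ls ↔ ∃ l ∈ ls, k <:+: l := by
  induction ls with
  | nil => simp [PySem.Chars.join_nil, List.infix_nil, hk]
  | cons a t ih =>
    cases t with
    | nil => simp [PySem.Chars.join_singleton]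
    | cons b t' =>
      rw [PySem.Chars.join_cons_cons, List.append_assoc, List.singleton_append,
        pv_infix_append_cons hc, ih]
      simp only [List.mem_cons]
      constructor
      · rintro (h | ⟨l, hl, h⟩)
        · exact ⟨a, Or.inl rfl, h⟩
        · exact ⟨l, Or.inr hl, h⟩
      · rintro ⟨l, (rfl | hl), h⟩
        · exact Or.inl h
        · exact Or.inr ⟨l, hl, h⟩

-- lower distributes over the newline-join
theorem pv_lower_join (ls : List (List Char)) :
    PySem.Chars.lower (PySem.Chars.join ['\n'] ls)
      = PySem.Chars.join ['\n'] (ls.map PySem.Chars.lower) := by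
  induction ls with
  | nil => rfl
  | cons a t ih =>
    cases t with
    | nil => simp [PySem.Chars.join_singleton]
    | cons b t' =>
      rw [PySem.Chars.join_cons_cons, List.map_cons, List.map_cons,
        PySem.Chars.join_cons_cons, ← List.map_cons (f := PySem.Chars.lower) (a := b) (l := t'), ← ih]
      simp [PySem.Chars.lower]
      decide

-- a nonempty newline-free keyword occurs in the lowered joined corpus iff it occurs in some lowered condition
theorem pv_corpus_fact (k : String) (hk : k.toList ≠ []) (hc : '\n' ∉ k.toList)
    (conds : List String) :
    PySem.Str.isIn k (PySem.Str.lower (PySem.Str.join "\n" conds)) = true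
      ↔ ∃ c ∈ conds, PySem.Str.isIn k (PySem.Str.lower c) = true := by
  rw [PySem.Str.isIn_iff_infix, PySem.Str.toList_lower, PySem.Str.toList_join,
    show "\n".toList = ['\n'] from rfl, pv_lower_join, List.map_map, pv_infix_join hc hk]
  simp [List.mem_map, PySem.Chars.isIn_iff_infix, PySem.Str.toList_lower]

-- ===== VERDICT (by name: the statement is the Claim_ definition above) =====
theorem has_similar_field_references_py_spec : Claim_equal_has_similar_field_references_py := by
  intro current_input previous_conditions _
  unfold Spec_has_similar_field_references_py
  have hgood : ∀ kws ∈ pvFieldGroups, ∀ k ∈ kws, k.toList ≠ [] ∧ '\n' ∉ k.toList := by decide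
  have hmap : pvFieldGroups = pvFieldPatterns.map Prod.snd := by decide
  rw [Bool.eq_iff_iff]
  simp only [has_similar_field_references_py, has_similar_field_references_py_alt,
    List.any_eq_true, Bool.and_eq_true]
  constructor
  · rintro ⟨cond, hcond, p, hp, ⟨kc, hkc, hkcin⟩, hcur⟩
    have hmem : p.2 ∈ pvFieldGroups := by rw [hmap]; exact List.mem_map_of_mem hp
    obtain ⟨h1, h2⟩ := hgood p.2 hmem kc hkc
    exact ⟨p.2, hmem, hcur, kc, hkc, (pv_corpus_fact kc h1 h2 _).2 ⟨cond, hcond, hkcin⟩⟩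
  · rintro ⟨kws, hkws, hcur, k, hk, hkcorp⟩
    obtain ⟨h1, h2⟩ := hgood kws hkws k hk
    obtain ⟨cond, hcond, hkc⟩ := (pv_corpus_fact k h1 h2 _).1 hkcorp
    rw [hmap] at hkws
    obtain ⟨p, hp, rfl⟩ := List.mem_map.1 hkws
    exact ⟨cond, hcond, p, hp, ⟨k, hk, hkc⟩, hcur⟩
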